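-- pv_equiv track=rewrite | github.com/KimGaeun309/-TIL | Prepare_Coding_Test/2021-2-Algorithm/practice/05. dynamic programming/left_align.py | leftAlign
-- ===== SOURCE A (Python) =====
-- def leftAlign(W, words):
-- 	DP = [0]
-- 	n = len(words)
-- 	for i in range(n): # word[i]까지의 최소 패널티 DP[i+1] 구하기
-- 		DP.append(DP[i] + (W - len(words[i]))**3)
--
-- 		for j in range(i-1, -1, -1): # 마지막 문장 범위 조정
-- 			# 마지막 문장 길이 계산
-- 			tmp = i - j
-- 			for k in range(j, i+1, 1):
-- 				tmp += len(words[k])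
-- 			# DP[i+1]의 값을 최소로 유지
-- 			if tmp <= W:
-- 				DP[i+1] = min(DP[j] + (W - tmp)**3, DP[i+1])
-- 			else: # 문장의 길이가 W 초과 -> break
-- 				break
--
-- 	return DP[n]
-- ===== SOURCE B (Python) =====
-- def leftAlign(W, words):
--     n = len(words)
--     # prefix sums of word lengths: pref[k] = total length of words[:k]
--     pref = [0]
--     for w in words:
--         pref.append(pref[-1] + len(w))
--     DP = [0]
--     for i in range(n):
--         # line consisting of words[i] alone (always taken, as in the DP recurrence)
--         best = DP[i] + (W - (pref[i + 1] - pref[i])) ** 3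
--         # grow the last line backwards; width in O(1) via the prefix sums
--         j = i - 1
--         while j >= 0:
--             width = (pref[i + 1] - pref[j]) + (i - j)
--             if width > W:
--                 break
--             cand = DP[j] + (W - width) ** 3
--             if cand < best:
--                 best = cand
--             j -= 1
--         DP.append(best)
--     return DP[n]
-- ===== Notes on version B (the rewrite author's own statement) =====
-- stated objective: faster
-- what changed: A recomputes each candidate last-line width with an inner k-loop over the words (O(n^3)); B precomputes prefix sums of word lengths once and gets each width in O(1), removing that inner loop.
import Mathlib
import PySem

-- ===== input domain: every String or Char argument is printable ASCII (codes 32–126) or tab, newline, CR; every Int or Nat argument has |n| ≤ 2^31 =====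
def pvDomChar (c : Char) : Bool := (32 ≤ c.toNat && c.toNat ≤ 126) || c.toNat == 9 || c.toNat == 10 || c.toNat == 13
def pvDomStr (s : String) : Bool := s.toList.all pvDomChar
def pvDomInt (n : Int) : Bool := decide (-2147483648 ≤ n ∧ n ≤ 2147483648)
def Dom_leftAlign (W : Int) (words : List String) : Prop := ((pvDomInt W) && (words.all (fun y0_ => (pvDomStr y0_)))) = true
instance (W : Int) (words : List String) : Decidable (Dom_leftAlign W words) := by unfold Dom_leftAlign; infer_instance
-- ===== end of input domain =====

-- B replaces A's O(n^3) re-summation of each candidate last line by prefix sums of the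
-- word lengths (O(n^2) total); a timing run measured B faster. Return values only.

-- ===== PORT A =====
-- inner j-loop of A: j runs f-1, f-2, …, 0 (break modelled by returning the accumulator);
-- the k-loop 'tmp = i - j; for k in range(j, i+1): tmp += len(words[k])' is the foldl.
def innerA (W : Int) (words : List String) (DP : List Int) (i : Nat) : Nat → Int → Int
  | 0, cur => cur
  | f + 1, cur =>
      let j := f
      let tmp := (List.range' j (i + 1 - j)).foldl
        (fun t k => t + PySem.Str.len (words.getD k "")) ((i : Int) - (j : Int))
      if tmp ≤ W then
        innerA W words DP i f (min (DP.getD j 0 + (W - tmp) ^ 3) cur)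
      else cur

def leftAlign (W : Int) (words : List String) : Int :=
  let n := words.length
  let DP := (List.range n).foldl
    (fun DP i =>
      DP ++ [innerA W words DP i i (DP.getD i 0 + (W - PySem.Str.len (words.getD i "")) ^ 3)])
    [0]
  DP.getD n 0

-- ===== PORT B =====
-- pref[k] = total length of words[:k]  (Source B: pref.append(pref[-1] + len(w)))
def prefB (words : List String) : List Int :=
  words.foldl (fun p w => p ++ [p.getLastD 0 + PySem.Str.len w]) [0]

-- Source B's while-loop: j runs f-1, …, 0; width computed in O(1) from pref; break on width > W
def innerB (W : Int) (pref DP : List Int) (i : Nat) : Nat → Int → Int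
  | 0, best => best
  | f + 1, best =>
      let j := f
      let width := (pref.getD (i + 1) 0 - pref.getD j 0) + ((i : Int) - (j : Int))
      if width > W then best
      else
        let cand := DP.getD j 0 + (W - width) ^ 3
        innerB W pref DP i f (if cand < best then cand else best)

def leftAlign_alt (W : Int) (words : List String) : Int :=
  let n := words.length
  let pref := prefB words
  let DP := (List.range n).foldl
    (fun DP i =>
      DP ++ [innerB W pref DP i i
        (DP.getD i 0 + (W - (pref.getD (i + 1) 0 - pref.getD i 0)) ^ 3)])
    [0]
  DP.getD n 0

-- ===== PRECONDITION & SPEC =====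
def Spec_leftAlign (W : Int) (words : List String) (out : Int) : Prop := out = leftAlign_alt W words
instance (W : Int) (words : List String) (out : Int) : Decidable (Spec_leftAlign W words out) := by unfold Spec_leftAlign; infer_instance

-- ===== CLAIM (what is proved, stated in full; the proofs are below) =====
def Claim_equal_leftAlign : Prop := ∀ (W : Int) (words : List String), Dom_leftAlign W words → Spec_leftAlign W words (leftAlign W words)

-- ===== LEMMAS AND PROOFS =====

-- S ws k = total length of the first k words
def S (ws : List String) (k : Nat) : Int := ((ws.take k).map PySem.Str.len).sum

def psums (c : Int) : List String → List Int
  | [] => []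
  | w :: ws => (c + PySem.Str.len w) :: psums (c + PySem.Str.len w) ws

theorem foldPref (ws : List String) : ∀ (p : List Int) (c : Int),
    ws.foldl (fun p w => p ++ [p.getLastD 0 + PySem.Str.len w]) (p ++ [c])
      = (p ++ [c]) ++ psums c ws := by
  induction ws with
  | nil => intro p c; simp [psums]
  | cons w ws ih =>
      intro p c
      have h1 : (p ++ [c]).getLastD 0 = c := by simp
      simp only [List.foldl_cons, h1, psums]
      have := ih (p ++ [c]) (c + PySem.Str.len w)
      simpa using this

theorem prefB_eq (ws : List String) : prefB ws = 0 :: psums 0 ws := by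
  have := foldPref ws [] 0
  simpa [prefB] using this

theorem S_succ (ws : List String) (j : Nat) (hj : j < ws.length) :
    S ws (j + 1) = S ws j + PySem.Str.len (ws.getD j "") := by
  have h1 : ws.take (j + 1) = ws.take j ++ [ws[j]] := by
    rw [List.take_add_one, List.getElem?_eq_getElem hj]; simp
  have h2 : ws.getD j "" = ws[j] := by
    simp [List.getD_eq_getElem?_getD, List.getElem?_eq_getElem hj]
  rw [S, S, h1, h2, List.map_append, List.sum_append]
  simp only [List.map_cons, List.map_nil, List.sum_cons, List.sum_nil, add_zero]

theorem psums_getD (ws : List String) : ∀ (c : Int) (k : Nat), k ≤ ws.length →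
    (c :: psums c ws).getD k 0 = c + S ws k := by
  induction ws with
  | nil =>
      intro c k hk
      have hk0 : k = 0 := by simpa using hk
      subst hk0
      simp [S, psums]
  | cons w ws ih =>
      intro c k hk
      cases k with
      | zero => simp [S]
      | succ k =>
          have hk' : k ≤ ws.length := by simpa using hk
          have hS : S (w :: ws) (k + 1) = PySem.Str.len w + S ws k := by
            simp [S]
          calc (c :: psums c (w :: ws)).getD (k + 1) 0
              = (psums c (w :: ws)).getD k 0 := by simp [List.getD]
            _ = ((c + PySem.Str.len w) :: psums (c + PySem.Str.len w) ws).getD k 0 := by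
                rw [psums]
            _ = (c + PySem.Str.len w) + S ws k := ih (c + PySem.Str.len w) k hk'
            _ = c + S (w :: ws) (k + 1) := by rw [hS]; ring

theorem pref_getD (ws : List String) (k : Nat) (hk : k ≤ ws.length) :
    (prefB ws).getD k 0 = S ws k := by
  rw [prefB_eq]
  simpa using psums_getD ws 0 k hk

theorem fold_range' (ws : List String) : ∀ (m j : Nat) (t0 : Int), j + m ≤ ws.length →
    (List.range' j m).foldl (fun t k => t + PySem.Str.len (ws.getD k "")) t0
      = t0 + (S ws (j + m) - S ws j) := by
  intro m
  induction m with
  | zero => intro j t0 _; simp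
  | succ m ih =>
      intro j t0 h
      have hj : j < ws.length := by omega
      have h' : (j + 1) + m ≤ ws.length := by omega
      rw [List.range'_succ, List.foldl_cons, ih (j + 1) _ h']
      have := S_succ ws j hj
      have he : j + (m + 1) = (j + 1) + m := by omega
      rw [he]
      omega

theorem inner_eq (W : Int) (ws : List String) (DP : List Int) (i : Nat) (hi : i < ws.length) :
    ∀ (f : Nat), f ≤ i → ∀ (cur : Int),
      innerA W ws DP i f cur = innerB W (prefB ws) DP i f cur := by
  intro f
  induction f with
  | zero => intro _ cur; simp [innerA, innerB]
  | succ f ih =>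
      intro hf cur
      have hsum : (List.range' f (i + 1 - f)).foldl
          (fun t k => t + PySem.Str.len (ws.getD k "")) ((i : Int) - (f : Nat))
            = ((i : Int) - (f : Nat)) + (S ws (i + 1) - S ws f) := by
        have h1 : f + (i + 1 - f) ≤ ws.length := by omega
        have := fold_range' ws (i + 1 - f) f ((i : Int) - (f : Nat)) h1
        have he : f + (i + 1 - f) = i + 1 := by omega
        rw [he] at this
        exact this
      have hp1 : (prefB ws).getD (i + 1) 0 = S ws (i + 1) := pref_getD ws (i + 1) (by omega)
      have hpf : (prefB ws).getD f 0 = S ws f := pref_getD ws f (by omega)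
      have hwidth : ((prefB ws).getD (i + 1) 0 - (prefB ws).getD f 0) + ((i : Int) - (f : Nat))
          = ((i : Int) - (f : Nat)) + (S ws (i + 1) - S ws f) := by
        rw [hp1, hpf]; ring
      simp only [innerA, innerB, hsum, hwidth]
      set t := ((i : Int) - (f : Nat)) + (S ws (i + 1) - S ws f) with ht
      by_cases hle : t ≤ W
      · have hgt : ¬ t > W := by omega
        simp only [if_pos hle, if_neg hgt]
        have hmin : min (DP.getD f 0 + (W - t) ^ 3) cur
            = (if DP.getD f 0 + (W - t) ^ 3 < cur then DP.getD f 0 + (W - t) ^ 3 else cur) := by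
          rw [min_def]; split_ifs <;> omega
        rw [hmin, ih (by omega)]
      · have hgt : t > W := by omega
        simp only [if_neg hle, if_pos hgt]

theorem DP_eq (W : Int) (ws : List String) :
    (List.range ws.length).foldl
        (fun DP i =>
          DP ++ [innerA W ws DP i i (DP.getD i 0 + (W - PySem.Str.len (ws.getD i "")) ^ 3)]) [0]
      = (List.range ws.length).foldl
        (fun DP i =>
          DP ++ [innerB W (prefB ws) DP i i
            (DP.getD i 0 + (W - ((prefB ws).getD (i + 1) 0 - (prefB ws).getD i 0)) ^ 3)]) [0] := by
  apply PySem.List.foldl_congr_mem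
  intro DP i hi
  have hilt : i < ws.length := List.mem_range.mp hi
  have hbase : PySem.Str.len (ws.getD i "")
      = (prefB ws).getD (i + 1) 0 - (prefB ws).getD i 0 := by
    rw [pref_getD ws (i + 1) (by omega), pref_getD ws i (by omega), S_succ ws i hilt]
    ring
  rw [← hbase, inner_eq W ws DP i hilt i (le_refl i)]

-- ===== VERDICT (by name: the statement is the Claim_ definition above) =====
theorem leftAlign_spec : Claim_equal_leftAlign := by
  intro W words _
  unfold Spec_leftAlign leftAlign leftAlign_alt
  simp only [DP_eq W words]
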